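-- pv_equiv track=rewrite | github.com/Pro-Machina/GA-NN | genetic.py | convStr2Mat
-- ===== SOURCE A (Python) =====
-- def convStr2Mat (prev, nxt, l, string):
--     """ Returns the weight matrix from the string, (input: neurons in previous and next layer, length of a chromosome, string) """
--
--     row = prev # Rows and cols are defined to avoid confusion
--     col = nxt
--     s_len = len(string)
--
--     wt = [[ [0 for g in range(l)] for c in range(col)] for r in range(row)] # Forms a wt matrix of size row X col X [string length]
--     count = 0
--
--     for r in range(row):
--         for c in range(col):
--             for g in range(l):
--                 if (count < s_len):
--                     wt[r][c][g] = string[count]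
--                     count = count + 1
--
--     return wt
-- ===== SOURCE B (Python) =====
-- def convStr2Mat(prev, nxt, l, string):
--     """ Returns the weight matrix from the string, (input: neurons in previous and next layer, length of a chromosome, string) """
--     row, col, L = max(prev, 0), max(nxt, 0), max(l, 0)
--     total = row * col * L
--     flat = list(string[:total])
--     flat += [0] * (total - len(flat))
--     return [[flat[(r * col + c) * L:(r * col + c) * L + L] for c in range(col)] for r in range(row)]
-- ===== Notes on version B (the rewrite author's own statement) =====
-- stated objective: simpler
-- what changed: Replaces the preallocated zero matrix mutated by a triple loop with a sequential counter by a flatten-pad-then-slice strategy: build one flat row-major buffer (string truncated/zero-padded to row*col*l) and cut each cell out of it by index arithmetic in a double comprehension.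
import Mathlib
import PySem

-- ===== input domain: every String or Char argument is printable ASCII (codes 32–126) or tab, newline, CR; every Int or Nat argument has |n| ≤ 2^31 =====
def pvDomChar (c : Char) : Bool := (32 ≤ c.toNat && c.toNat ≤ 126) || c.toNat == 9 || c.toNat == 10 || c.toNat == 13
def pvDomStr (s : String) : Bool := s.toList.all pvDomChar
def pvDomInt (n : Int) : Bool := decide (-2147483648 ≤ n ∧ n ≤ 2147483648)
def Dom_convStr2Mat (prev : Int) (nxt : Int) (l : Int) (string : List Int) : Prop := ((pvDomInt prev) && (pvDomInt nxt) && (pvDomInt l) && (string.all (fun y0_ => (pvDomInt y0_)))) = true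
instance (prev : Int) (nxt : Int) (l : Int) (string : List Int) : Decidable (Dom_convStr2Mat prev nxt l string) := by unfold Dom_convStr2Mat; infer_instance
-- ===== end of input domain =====

-- B replaces A's preallocated zero matrix filled by a triple loop with a sequential counter
-- by a flatten-pad-then-slice construction (objective: simpler).

-- ===== PORT A =====
-- helper for the assignment 'wt[r][c][g] = v'; exact for the nonnegative in-range
-- indices that the range() loops below always produce (Python would raise otherwise).
def pySet3 (wt : List (List (List Int))) (r c g : Int) (v : Int) : List (List (List Int)) :=
  wt.modify r.toNat (fun rw => rw.modify c.toNat (fun cell => cell.set g.toNat v))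

def convStr2Mat (prev : Int) (nxt : Int) (l : Int) (string : List Int) : List (List (List Int)) :=
  let row := prev
  let col := nxt
  let s_len : Int := string.length
  let wt : List (List (List Int)) :=
    (PySem.List.pyRange 0 row 1).map (fun _r =>
      (PySem.List.pyRange 0 col 1).map (fun _c =>
        (PySem.List.pyRange 0 l 1).map (fun _g => (0 : Int))))
  let fin :=
    (PySem.List.pyRange 0 row 1).foldl (fun st r =>
      (PySem.List.pyRange 0 col 1).foldl (fun st c =>
        (PySem.List.pyRange 0 l 1).foldl (fun st g =>
          if st.2 < s_len then
            (pySet3 st.1 r c g (PySem.List.pyGetD string st.2 0), st.2 + 1)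
          else st) st) st) (wt, (0 : Int))
  fin.1

-- ===== PORT B =====
def convStr2Mat_alt (prev : Int) (nxt : Int) (l : Int) (string : List Int) : List (List (List Int)) :=
  let row := max prev 0
  let col := max nxt 0
  let L := max l 0
  let total := row * col * L
  let flat0 := PySem.List.slice string none (some total)
  let flat := flat0 ++ List.replicate (total - (flat0.length : Int)).toNat (0 : Int)
  (PySem.List.pyRange 0 row 1).map (fun r =>
    (PySem.List.pyRange 0 col 1).map (fun c =>
      PySem.List.slice flat (some ((r * col + c) * L)) (some ((r * col + c) * L + L))))

-- ===== PRECONDITION & SPEC =====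
def Spec_convStr2Mat (prev : Int) (nxt : Int) (l : Int) (string : List Int) (out : List (List (List Int))) : Prop := out = convStr2Mat_alt prev nxt l string
instance (prev : Int) (nxt : Int) (l : Int) (string : List Int) (out : List (List (List Int))) : Decidable (Spec_convStr2Mat prev nxt l string out) := by unfold Spec_convStr2Mat; infer_instance

-- ===== CLAIM (what is proved, stated in full; the proofs are below) =====
def Claim_equal_convStr2Mat : Prop := ∀ (prev : Int) (nxt : Int) (l : Int) (string : List Int), Dom_convStr2Mat prev nxt l string → Spec_convStr2Mat prev nxt l string (convStr2Mat prev nxt l string)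

-- ===== LEMMAS AND PROOFS =====

-- common closed form both ports are reduced to: cell (r,c,g) holds string[(r*col+c)*l+g] when
-- that index exists, else 0
def pvTarget (prev nxt l : Int) (s : List Int) : List (List (List Int)) :=
  (List.range prev.toNat).map (fun r =>
    (List.range nxt.toNat).map (fun c =>
      (List.range l.toNat).map (fun g =>
        if (r * nxt.toNat + c) * l.toNat + g < s.length
        then s.getD ((r * nxt.toNat + c) * l.toNat + g) 0 else 0)))

-- the count after a block of K fill steps starting from ct
def pvCnt (slen K ct : Int) : Int := max ct (min (ct + K) slen)

-- the element transform the innermost loop applies to a cell (n steps, entry count ct)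
def pvFg (s : List Int) (n : Nat) (ct : Int) : Nat → Int → Int :=
  fun g a => if g < n ∧ ct + (g : Int) < (s.length : Int) then PySem.List.pyGetD s (ct + g) 0 else a

lemma pv_pyRange0 (n : Int) :
    PySem.List.pyRange 0 n 1 = (List.range n.toNat).map (fun (k : Nat) => (k : Int)) := by
  rw [PySem.List.pyRange_one]
  simp only [zero_add, Int.sub_zero]

lemma pv_modify_modify {A : Type} (i : Nat) (f g : A → A) (l : List A) :
    (l.modify i f).modify i g = l.modify i (fun a => g (f a)) := by
  apply List.ext_getElem
  · simp
  · intro j h1 h2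
    simp only [List.getElem_modify]
    split_ifs <;> rfl

lemma pv_modify_lam_id {A : Type} (i : Nat) (l : List A) :
    l.modify i (fun a => a) = l := List.modify_id i l

lemma pv_cnt_comp (slen K1 K2 c0 : Int) (h1 : 0 ≤ K1) (h2 : 0 ≤ K2) :
    pvCnt slen K2 (pvCnt slen K1 c0) = pvCnt slen (K1 + K2) c0 := by
  unfold pvCnt; omega

-- the flat padded buffer of B, elementwise
lemma pv_flat_char (s : List Int) (t : Nat) :
    s.take t ++ List.replicate (t - min t s.length) 0
      = (List.range t).map (fun i => s.getD i 0) := by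
  apply List.ext_getElem
  · simp only [List.length_append, List.length_take, List.length_replicate, List.length_map,
      List.length_range]
    omega
  · intro i h1 h2
    simp only [List.length_append, List.length_take, List.length_replicate] at h1
    simp only [List.length_map, List.length_range] at h2
    simp only [List.getElem_append, List.getElem_map, List.getElem_range, List.length_take]
    split_ifs with h
    · rw [List.getElem_take]
      rw [List.getD_eq_getElem s 0 (by omega)]
    · rw [List.getElem_replicate]
      rw [List.getD_eq_default]
      omega

-- Level 1: the innermost loop, characterised
lemma pv_gfold (s : List Int) (rn cn : Nat) (n : Nat) :
    ∀ (wt : List (List (List Int))) (ct : Int),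
    (List.range n).foldl (fun st (k : Nat) =>
        if st.2 < (s.length : Int)
        then (pySet3 st.1 rn cn k (PySem.List.pyGetD s st.2 0), st.2 + 1) else st) (wt, ct)
      = (wt.modify rn (fun row => row.modify cn (fun cell => cell.mapIdx (pvFg s n ct))),
         pvCnt (s.length : Int) (n : Int) ct) := by
  induction n with
  | zero =>
      intro wt ct
      have hrow : (fun row : List (List Int) => row.modify cn (fun cell => cell.mapIdx (pvFg s 0 ct)))
          = fun row => row := by
        funext row
        have hcell : (fun cell : List Int => cell.mapIdx (pvFg s 0 ct)) = fun cell => cell := by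
          funext cell
          apply List.ext_getElem
          · simp
          · intro j h1 h2; simp [List.getElem_mapIdx, pvFg]
        rw [hcell, pv_modify_lam_id]
      simp only [List.range_zero, List.foldl_nil]
      rw [Prod.mk.injEq]
      refine ⟨?_, by unfold pvCnt; push_cast; omega⟩
      rw [hrow, pv_modify_lam_id]
  | succ n ih =>
      intro wt ct
      rw [List.range_succ, List.foldl_append, ih]
      simp only [List.foldl_cons, List.foldl_nil]
      by_cases hfire : pvCnt (s.length : Int) (n : Int) ct < (s.length : Int)
      · rw [if_pos hfire, Prod.mk.injEq]
        constructor
        · unfold pySet3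
          simp only [Int.toNat_natCast]
          rw [pv_modify_modify]
          congr 1
          funext row
          rw [pv_modify_modify]
          congr 1
          funext cell
          have hct : pvCnt (s.length : Int) (n : Int) ct = ct + n := by
            unfold pvCnt at hfire ⊢; omega
          rw [hct]
          apply List.ext_getElem
          · simp
          · intro j h1 h2
            simp only [List.getElem_set, List.getElem_mapIdx]
            by_cases hnj : n = j
            · subst hnj
              have hc : (n < n + 1 ∧ ct + (n : Int) < (s.length : Int)) := by
                refine ⟨by omega, ?_⟩
                unfold pvCnt at hfire; omega
              rw [if_pos rfl]
              unfold pvFg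
              rw [if_pos hc]
            · rw [if_neg hnj]
              unfold pvFg
              split_ifs <;> first | rfl | omega
        · unfold pvCnt at hfire ⊢; push_cast; omega
      · rw [if_neg hfire, Prod.mk.injEq]
        constructor
        · congr 1
          funext row
          congr 1
          funext cell
          apply List.ext_getElem
          · simp
          · intro j h1 h2
            simp only [List.getElem_mapIdx]
            unfold pvFg
            unfold pvCnt at hfire
            split_ifs <;> first | rfl | omega
        · unfold pvCnt at hfire ⊢; push_cast; omega

-- Level 2: the middle loop, characterised
lemma pv_cfold (s : List Int) (rn Lg : Nat) (m : Nat) :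
    ∀ (wt : List (List (List Int))) (ct : Int),
    (List.range m).foldl (fun st (k : Nat) =>
        (List.range Lg).foldl (fun st' (k' : Nat) =>
          if st'.2 < (s.length : Int)
          then (pySet3 st'.1 rn k k' (PySem.List.pyGetD s st'.2 0), st'.2 + 1) else st') st) (wt, ct)
      = (wt.modify rn (fun row => row.mapIdx (fun c a =>
            if c < m then a.mapIdx (pvFg s Lg (pvCnt (s.length : Int) ((c : Int) * (Lg : Int)) ct)) else a)),
         pvCnt (s.length : Int) ((m : Int) * (Lg : Int)) ct) := by
  induction m with
  | zero =>
      intro wt ct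
      have hrow : (fun row : List (List Int) => row.mapIdx (fun c a =>
          if c < 0 then a.mapIdx (pvFg s Lg (pvCnt (s.length : Int) ((c : Int) * (Lg : Int)) ct)) else a))
          = fun row => row := by
        funext row
        apply List.ext_getElem
        · simp
        · intro j h1 h2; simp [List.getElem_mapIdx]
      simp only [List.range_zero, List.foldl_nil]
      rw [Prod.mk.injEq]
      refine ⟨?_, by unfold pvCnt; push_cast; rw [zero_mul]; omega⟩
      rw [hrow, pv_modify_lam_id]
  | succ m ih =>
      intro wt ct
      rw [List.range_succ, List.foldl_append, ih]
      simp only [List.foldl_cons, List.foldl_nil]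
      rw [pv_gfold, pv_modify_modify, Prod.mk.injEq]
      constructor
      · congr 1
        funext row
        apply List.ext_getElem
        · simp
        · intro j h1 h2
          simp only [List.getElem_modify, List.getElem_mapIdx]
          by_cases hmj : m = j
          · subst hmj
            rw [if_pos rfl]
            have h1' : ¬ (m < m) := by omega
            have h2' : m < m + 1 := by omega
            rw [if_neg h1', if_pos h2']
          · rw [if_neg hmj]
            split_ifs <;> first | rfl | omega
      · rw [pv_cnt_comp _ _ _ _ (by positivity) (by positivity)]
        congr 1
        push_cast; ring

-- Level 3: the full triple loop, characterised
lemma pv_rfold (s : List Int) (Cn Lg : Nat) (Rn : Nat) :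
    ∀ (wt : List (List (List Int))) (ct : Int),
    (List.range Rn).foldl (fun st (k : Nat) =>
        (List.range Cn).foldl (fun st' (k' : Nat) =>
          (List.range Lg).foldl (fun st'' (k'' : Nat) =>
            if st''.2 < (s.length : Int)
            then (pySet3 st''.1 k k' k'' (PySem.List.pyGetD s st''.2 0), st''.2 + 1) else st'') st') st) (wt, ct)
      = (wt.mapIdx (fun r row =>
            if r < Rn then row.mapIdx (fun c a =>
              if c < Cn then a.mapIdx (pvFg s Lg
                (pvCnt (s.length : Int) ((r : Int) * ((Cn : Int) * (Lg : Int)) + (c : Int) * (Lg : Int)) ct)) else a)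
            else row),
         pvCnt (s.length : Int) ((Rn : Int) * ((Cn : Int) * (Lg : Int))) ct) := by
  induction Rn with
  | zero =>
      intro wt ct
      simp only [List.range_zero, List.foldl_nil]
      rw [Prod.mk.injEq]
      constructor
      · apply List.ext_getElem
        · simp
        · intro j h1 h2; simp [List.getElem_mapIdx]
      · unfold pvCnt; push_cast; rw [zero_mul]; omega
  | succ Rn ih =>
      intro wt ct
      rw [List.range_succ, List.foldl_append, ih]
      simp only [List.foldl_cons, List.foldl_nil]
      rw [pv_cfold, Prod.mk.injEq]
      constructor
      · apply List.ext_getElem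
        · simp
        · intro j h1 h2
          simp only [List.getElem_modify, List.getElem_mapIdx]
          by_cases hrj : Rn = j
          · subst hrj
            have h1' : ¬ (Rn < Rn) := by omega
            have h2' : Rn < Rn + 1 := by omega
            rw [if_pos rfl, if_neg h1', if_pos h2']
            have hcomp : ∀ c : Nat,
                pvCnt (s.length : Int) ((c : Int) * (Lg : Int))
                  (pvCnt (s.length : Int) ((Rn : Int) * ((Cn : Int) * (Lg : Int))) ct)
                = pvCnt (s.length : Int) ((Rn : Int) * ((Cn : Int) * (Lg : Int)) + (c : Int) * (Lg : Int)) ct :=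
              fun c => pv_cnt_comp _ _ _ _ (by positivity) (by positivity)
            simp only [hcomp]
          · rw [if_neg hrj]
            split_ifs with ha hb hb
            · rfl
            · omega
            · omega
            · rfl
      · rw [pv_cnt_comp _ _ _ _ (by positivity) (by positivity)]
        congr 1
        push_cast; ring

-- A equals the closed form
lemma pv_A_char (prev nxt l : Int) (s : List Int) :
    convStr2Mat prev nxt l s = pvTarget prev nxt l s := by
  unfold convStr2Mat
  simp only [pv_pyRange0, List.foldl_map]
  rw [pv_rfold]
  unfold pvTarget
  apply List.ext_getElem
  · simp
  · intro r hr1 hr2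
    simp only [List.length_mapIdx, List.length_map, List.length_range] at hr1 hr2
    simp only [List.getElem_mapIdx, List.getElem_map, List.getElem_range]
    rw [if_pos hr1]
    apply List.ext_getElem
    · simp
    · intro c hc1 hc2
      simp only [List.length_mapIdx, List.length_map, List.length_range] at hc1 hc2
      simp only [List.getElem_mapIdx, List.getElem_map, List.getElem_range]
      rw [if_pos hc1]
      apply List.ext_getElem
      · simp
      · intro g hg1 hg2
        simp only [List.length_mapIdx, List.length_map, List.length_range] at hg1 hg2
        simp only [List.getElem_mapIdx, List.getElem_map, List.getElem_range]
        unfold pvFg pvCnt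
        have hKpos : 0 ≤ (r : Int) * ((nxt.toNat : Int) * (l.toNat : Int)) + (c : Int) * (l.toNat : Int) := by
          positivity
        by_cases hidx : (r * nxt.toNat + c) * l.toNat + g < s.length
        · have hKc : (((r * nxt.toNat + c) * l.toNat + g : Nat) : Int)
              = ((r : Int) * ((nxt.toNat : Int) * (l.toNat : Int)) + (c : Int) * (l.toNat : Int)) + (g : Int) := by
            push_cast; ring
          have hidx' : ((r : Int) * ((nxt.toNat : Int) * (l.toNat : Int)) + (c : Int) * (l.toNat : Int)) + (g : Int) < (s.length : Int) := by
            rw [← hKc]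
            exact_mod_cast hidx
          have hcond : g < l.toNat ∧
              max 0 (min (0 + ((r : Int) * ((nxt.toNat : Int) * (l.toNat : Int)) + (c : Int) * (l.toNat : Int))) (s.length : Int)) + (g : Int) < (s.length : Int) := by
            refine ⟨hg1, ?_⟩
            omega
          rw [if_pos hcond, if_pos hidx]
          have harg : max 0 (min (0 + ((r : Int) * ((nxt.toNat : Int) * (l.toNat : Int)) + (c : Int) * (l.toNat : Int))) (s.length : Int)) + (g : Int)
              = (((r * nxt.toNat + c) * l.toNat + g : Nat) : Int) := by
            rw [hKc]; omega
          rw [harg]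
          exact PySem.List.pyGetD_natCast s _ 0
        · have hKc : (((r * nxt.toNat + c) * l.toNat + g : Nat) : Int)
              = ((r : Int) * ((nxt.toNat : Int) * (l.toNat : Int)) + (c : Int) * (l.toNat : Int)) + (g : Int) := by
            push_cast; ring
          have hidx' : ¬ (((r : Int) * ((nxt.toNat : Int) * (l.toNat : Int)) + (c : Int) * (l.toNat : Int)) + (g : Int) < (s.length : Int)) := by
            rw [← hKc]
            exact_mod_cast hidx
          have hcond : ¬ (g < l.toNat ∧
              max 0 (min (0 + ((r : Int) * ((nxt.toNat : Int) * (l.toNat : Int)) + (c : Int) * (l.toNat : Int))) (s.length : Int)) + (g : Int) < (s.length : Int)) := by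
            intro hcon
            omega
          rw [if_neg hcond, if_neg hidx]

-- B equals the closed form
lemma pv_B_char (prev nxt l : Int) (s : List Int) :
    convStr2Mat_alt prev nxt l s = pvTarget prev nxt l s := by
  simp only [convStr2Mat_alt]
  have hRn : max prev 0 = (prev.toNat : Int) := (Int.toNat_eq_max prev).symm
  have hCn : max nxt 0 = (nxt.toNat : Int) := (Int.toNat_eq_max nxt).symm
  have hLn : max l 0 = (l.toNat : Int) := (Int.toNat_eq_max l).symm
  rw [hRn, hCn, hLn]
  have htot : (prev.toNat : Int) * (nxt.toNat : Int) * (l.toNat : Int)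
      = ((prev.toNat * nxt.toNat * l.toNat : Nat) : Int) := by push_cast; ring
  rw [htot, PySem.List.slice_to_natCast]
  set N := prev.toNat * nxt.toNat * l.toNat with hN
  have hlen : (((s.take N).length : Nat) : Int) = ((min N s.length : Nat) : Int) := by
    simp
  rw [hlen]
  have hrep : (((N : Nat) : Int) - ((min N s.length : Nat) : Int)).toNat = N - min N s.length := by
    omega
  rw [hrep, pv_flat_char]
  unfold pvTarget
  simp only [pv_pyRange0, Int.toNat_natCast]
  apply List.ext_getElem
  · simp
  · intro r hr1 hr2
    simp only [List.length_map, List.length_range] at hr1 hr2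
    simp only [List.getElem_map, List.getElem_range]
    apply List.ext_getElem
    · simp
    · intro c hc1 hc2
      simp only [List.length_map, List.length_range] at hc1 hc2
      simp only [List.getElem_map, List.getElem_range]
      have hst : ((r : Int) * (nxt.toNat : Int) + (c : Int)) * (l.toNat : Int)
          = (((r * nxt.toNat + c) * l.toNat : Nat) : Int) := by push_cast; ring
      rw [hst, PySem.List.slice_natCast_add]
      set j := (r * nxt.toNat + c) * l.toNat with hj
      have hjN : j + l.toNat ≤ N := by
        have h1 : r * nxt.toNat + c + 1 ≤ prev.toNat * nxt.toNat := by
          calc r * nxt.toNat + c + 1 ≤ r * nxt.toNat + nxt.toNat := by omega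
          _ = (r + 1) * nxt.toNat := by ring
          _ ≤ prev.toNat * nxt.toNat := Nat.mul_le_mul_right _ (by omega)
        calc j + l.toNat = (r * nxt.toNat + c + 1) * l.toNat := by rw [hj]; ring
        _ ≤ prev.toNat * nxt.toNat * l.toNat := Nat.mul_le_mul_right _ h1
      apply List.ext_getElem
      · simp only [List.length_take, List.length_drop, List.length_map, List.length_range]
        omega
      · intro g hg1 hg2
        simp only [List.length_take, List.length_drop, List.length_map, List.length_range] at hg1 hg2
        simp only [List.getElem_take, List.getElem_drop, List.getElem_map, List.getElem_range]
        by_cases hidx : j + g < s.length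
        · rw [if_pos hidx]
        · rw [if_neg hidx, List.getD_eq_default]
          omega

-- ===== VERDICT (by name: the statement is the Claim_ definition above) =====
theorem convStr2Mat_spec : Claim_equal_convStr2Mat := by
  intro prev nxt l string _
  unfold Spec_convStr2Mat
  rw [pv_A_char, pv_B_char]
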